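-- pv_equiv track=rewrite | github.com/HYUNMIN-KIM/flask_start | pattern_matcher/sentence_pattern_matcher.py | forward_match
-- ===== SOURCE A (Python) =====
-- def forward_match(sentence, prefix_list, str_array):
--     ret_list = []
--     if prefix_list is None:
--         for str_unit in str_array:
--             if sentence.startswith(str_unit):
--                 ret_list.append(str_unit)
--     else:
--         for prefix in prefix_list:
--             for str_unit in str_array:
--                 merged_str = prefix + str_unit
--                 if sentence.startswith(merged_str):
--                     ret_list.append(merged_str)
--
--     return ret_list
-- ===== SOURCE B (Python) =====
-- def forward_match(sentence, prefix_list, str_array):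
--     # Index str_array once: unit -> list of its positions.
--     unit_index = {}
--     for i, u in enumerate(str_array):
--         unit_index[u] = unit_index.get(u, []) + [i]
--
--     def matches_at(suffix):
--         # Enumerate candidate match lengths of the suffix, look each prefix of
--         # the suffix up in the index, then restore str_array order by sorting
--         # the collected (position, unit) hits.
--         hits = []
--         for length in range(len(suffix) + 1):
--             t = suffix[:length]
--             hits.extend((i, t) for i in unit_index.get(t, []))
--         hits.sort(key=lambda h: h[0])
--         return hits
--
--     if prefix_list is None:
--         return [u for _, u in matches_at(sentence)]
--     ret_list = []
--     for p in prefix_list: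
--         if sentence.startswith(p):
--             ret_list.extend(p + u for _, u in matches_at(sentence[len(p):]))
--     return ret_list
-- ===== Notes on version B (the rewrite author's own statement) =====
-- stated objective: alternative
-- what changed: B replaces the per-prefix scan of str_array (testing each prefix+str_unit concatenation against the sentence) by a dictionary built once mapping each unit to its positions; per matching prefix it enumerates the suffix's prefixes as dictionary keys, collects (position, unit) hits and sorts them by position to restore str_array order.
import Mathlib
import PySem

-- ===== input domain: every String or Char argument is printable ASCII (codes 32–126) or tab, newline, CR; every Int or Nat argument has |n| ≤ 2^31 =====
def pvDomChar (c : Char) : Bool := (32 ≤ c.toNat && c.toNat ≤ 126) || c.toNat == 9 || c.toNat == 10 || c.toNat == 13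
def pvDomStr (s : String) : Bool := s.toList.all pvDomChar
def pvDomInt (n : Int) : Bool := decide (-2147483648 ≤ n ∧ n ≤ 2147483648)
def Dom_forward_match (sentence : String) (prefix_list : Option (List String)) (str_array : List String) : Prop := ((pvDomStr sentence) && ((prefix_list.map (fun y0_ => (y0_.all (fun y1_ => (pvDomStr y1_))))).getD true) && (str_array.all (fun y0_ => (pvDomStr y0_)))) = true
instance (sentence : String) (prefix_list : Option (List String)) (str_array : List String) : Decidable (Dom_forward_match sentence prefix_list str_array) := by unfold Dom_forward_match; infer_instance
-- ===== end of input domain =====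

-- B indexes str_array once in a dict (unit -> positions), then per matching prefix enumerates the suffix's prefixes as dict keys and sorts the collected (position, unit) hits back into str_array order — the per-prefix scan over str_array disappears (alternative algorithm).


-- ===== PORT A =====
def forward_match (sentence : String) (prefix_list : Option (List String)) (str_array : List String) : List String :=
  match prefix_list with
  | none =>
      str_array.foldl (fun ret_list str_unit =>
        if PySem.Str.startswith sentence str_unit then ret_list ++ [str_unit] else ret_list) []
  | some pl =>
      pl.foldl (fun ret_list pfx =>
        str_array.foldl (fun ret_list str_unit =>
          let merged_str := pfx ++ str_unit
          if PySem.Str.startswith sentence merged_str then ret_list ++ [merged_str] else ret_list)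
          ret_list) []

-- ===== PORT B =====
-- unit_index[u] = unit_index.get(u, []) + [i]  over enumerate(str_array)
def pvUnitIndex (str_array : List String) : PySem.Dict String (List Int) :=
  (PySem.List.enumerate str_array 0).foldl
    (fun d p => d.modify p.2 [] (· ++ [p.1])) PySem.Dict.empty

-- matches_at(suffix): look every prefix of the suffix up in the index, sort hits by position
def pvMatchesAt (unit_index : PySem.Dict String (List Int)) (suffix : String) : List (Int × String) :=
  let hits := (PySem.List.pyRange 0 (PySem.Str.len suffix + 1) 1).foldl
    (fun hits L =>
      let t := PySem.Str.slice suffix none (some L)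
      hits ++ (unit_index.getD t []).map (fun i => (i, t))) []
  PySem.List.sorted hits (fun h => h.1) false

def forward_match_alt (sentence : String) (prefix_list : Option (List String)) (str_array : List String) : List String :=
  let unit_index := pvUnitIndex str_array
  match prefix_list with
  | none => (pvMatchesAt unit_index sentence).map (fun h => h.2)
  | some pl =>
      pl.foldl (fun ret_list p =>
        if PySem.Str.startswith sentence p then
          ret_list ++ (pvMatchesAt unit_index (PySem.Str.slice sentence (some (PySem.Str.len p)) none)).map (fun h => p ++ h.2)
        else ret_list) []

-- ===== PRECONDITION & SPEC =====
def Spec_forward_match (sentence : String) (prefix_list : Option (List String)) (str_array : List String) (out : List String) : Prop := out = forward_match_alt sentence prefix_list str_array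
instance (sentence : String) (prefix_list : Option (List String)) (str_array : List String) (out : List String) : Decidable (Spec_forward_match sentence prefix_list str_array out) := by unfold Spec_forward_match; infer_instance

-- ===== CLAIM (what is proved, stated in full; the proofs are below) =====
def Claim_equal_forward_match : Prop := ∀ (sentence : String) (prefix_list : Option (List String)) (str_array : List String), Dom_forward_match sentence prefix_list str_array → Spec_forward_match sentence prefix_list str_array (forward_match sentence prefix_list str_array)

-- ===== LEMMAS AND PROOFS =====

-- prefix decomposition on lists
theorem pv_pfx_append_iff {α : Type} (a b s : List α) :
    a ++ b <+: s ↔ a <+: s ∧ b <+: s.drop a.length := by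
  constructor
  · rintro ⟨t, rfl⟩
    exact ⟨⟨b ++ t, by simp⟩, by simp⟩
  · rintro ⟨⟨t, rfl⟩, hb⟩
    simp only [List.drop_left] at hb
    obtain ⟨u, rfl⟩ := hb
    exact ⟨u, by simp⟩

-- sentence.startswith(p+u) = sentence.startswith(p) && suffix.startswith(u)
theorem pv_startswith_append (sentence p u : String) :
    PySem.Str.startswith sentence (p ++ u)
      = (PySem.Str.startswith sentence p
         && PySem.Str.startswith (PySem.Str.slice sentence (some (PySem.Str.len p)) none) u) := by
  have h1 : (PySem.Str.slice sentence (some (PySem.Str.len p)) none).toList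
      = sentence.toList.drop p.toList.length := by
    simp [PySem.Str.slice, PySem.Chars.slice_eq_listSlice, PySem.List.slice_from_natCast,
      PySem.Str.len]
  rw [Bool.eq_iff_iff]
  simp only [PySem.Str.startswith_eq, Bool.and_eq_true, PySem.Chars.startswith_iff,
    String.toList_append, h1]
  exact pv_pfx_append_iff _ _ _

theorem pv_unitIndex_getD (str_array : List String) (t : String) :
    (pvUnitIndex str_array).getD t []
      = ((PySem.List.enumerate str_array 0).filter (fun q => q.2 == t)).map (fun q => q.1) := by
  unfold pvUnitIndex
  have h := PySem.Dict.getD_foldl_modify_append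
    ((PySem.List.enumerate str_array 0).map (fun p : Int × String => (p.2, p.1)))
    (PySem.Dict.empty (κ := String) (ν := List Int)) t
  rw [List.foldl_map] at h
  rw [h]
  simp [List.filter_map, List.map_map, Function.comp_def]

theorem pv_block (l : List (Int × String)) (t : String) :
    ((l.filter (fun q => q.2 == t)).map (fun q => q.1)).map (fun i => (i, t))
      = l.filter (fun q => q.2 == t) := by
  rw [List.map_map]
  conv_rhs => rw [← List.map_id (l.filter (fun q => q.2 == t))]
  apply List.map_congr_left
  intro q hq
  have hq2 := (List.mem_filter.mp hq).2
  simp only [beq_iff_eq] at hq2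
  simp [Function.comp, ← hq2]

theorem pv_map_snd_filter (str_array : List String) (p : String → Bool) :
    ((PySem.List.enumerate str_array 0).filter (fun q => p q.2)).map (fun q => q.2)
      = str_array.filter p := by
  conv_rhs => rw [← PySem.List.map_snd_enumerate str_array 0]
  rw [List.filter_map]
  rfl

theorem pv_partition_perm (l : List (Int × String)) (ts : List String) (h : ts.Nodup) :
    (ts.flatMap (fun t => l.filter (fun q => q.2 == t))).Perm
      (l.filter (fun q => decide (q.2 ∈ ts))) := by
  induction ts with
  | nil => simp
  | cons t ts ih =>
      rcases List.nodup_cons.mp h with ⟨hnot, hnd⟩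
      have ih' := ih hnd
      rw [List.flatMap_cons]
      have h1 : (l.filter (fun q => decide (q.2 ∈ t :: ts))).filter (fun q => q.2 == t)
          = l.filter (fun q => q.2 == t) := by
        rw [List.filter_filter]
        apply List.filter_congr
        intro x _
        by_cases hx : x.2 = t <;> simp [hx]
      have h2 : (l.filter (fun q => decide (q.2 ∈ t :: ts))).filter (fun q => !(q.2 == t))
          = l.filter (fun q => decide (q.2 ∈ ts)) := by
        rw [List.filter_filter]
        apply List.filter_congr
        intro x _
        by_cases hx : x.2 = t
        · simp [hx, hnot]
        · simp [hx]
      have hperm := List.filter_append_perm (fun q : Int × String => q.2 == t)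
        (l.filter (fun q => decide (q.2 ∈ t :: ts)))
      rw [h1, h2] at hperm
      exact (List.Perm.append_left _ ih').trans hperm

theorem pv_slice_to_toList (s : String) (L : Int) (hL : 0 ≤ L) :
    (PySem.Str.slice s none (some L)).toList = s.toList.take L.toNat := by
  simp [PySem.Str.slice, PySem.Chars.slice_eq_listSlice]
  exact PySem.List.slice_to s.toList hL

theorem pv_len_toList (s : String) : PySem.Str.len s = (s.toList.length : Int) := by
  simp [PySem.Str.len]

theorem pv_ts_spec (s : String) (u : String) :
    (u ∈ (PySem.List.pyRange 0 (PySem.Str.len s + 1) 1).map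
        (fun L => PySem.Str.slice s none (some L)))
      ↔ PySem.Str.startswith s u = true := by
  rw [List.mem_map]
  simp only [PySem.Str.startswith_eq, PySem.Chars.startswith_iff]
  constructor
  · rintro ⟨L, hL, rfl⟩
    rw [PySem.List.mem_pyRange_one] at hL
    rw [pv_slice_to_toList s L hL.1]
    exact List.take_prefix _ _
  · intro hpre
    refine ⟨(u.toList.length : Int), ?_, ?_⟩
    · rw [PySem.List.mem_pyRange_one, pv_len_toList]
      have := hpre.length_le
      omega
    · apply String.toList_inj.mp
      rw [pv_slice_to_toList s _ (by positivity)]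
      simp only [Int.toNat_natCast]
      exact (List.prefix_iff_eq_take.mp hpre).symm

theorem pv_ts_nodup (s : String) :
    ((PySem.List.pyRange 0 (PySem.Str.len s + 1) 1).map
        (fun L => PySem.Str.slice s none (some L))).Nodup := by
  apply List.Nodup.map_on _ (PySem.List.nodup_pyRange_one 0 (PySem.Str.len s + 1))
  intro L1 h1 L2 h2 heq
  rw [PySem.List.mem_pyRange_one] at h1 h2
  rw [pv_len_toList] at h1 h2
  have := congrArg (fun t : String => t.toList.length) heq
  simp only [pv_slice_to_toList s L1 h1.1, pv_slice_to_toList s L2 h2.1,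
    List.length_take] at this
  omega

theorem pv_matchesAt_eq (str_array : List String) (s : String) :
    pvMatchesAt (pvUnitIndex str_array) s
      = (PySem.List.enumerate str_array 0).filter (fun q => PySem.Str.startswith s q.2) := by
  unfold pvMatchesAt
  simp only [PySem.List.foldl_append_eq_flatMap, List.nil_append]
  have hb : (fun L => ((pvUnitIndex str_array).getD (PySem.Str.slice s none (some L)) []).map
        (fun i => (i, PySem.Str.slice s none (some L))))
      = (fun L => (PySem.List.enumerate str_array 0).filter
          (fun q => q.2 == PySem.Str.slice s none (some L))) := by
    funext L
    rw [pv_unitIndex_getD]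
    exact pv_block _ _
  rw [hb]
  have hflat : ((PySem.List.pyRange 0 (PySem.Str.len s + 1) 1).map
        (fun L => PySem.Str.slice s none (some L))).flatMap
          (fun t => (PySem.List.enumerate str_array 0).filter (fun q => q.2 == t))
      = (PySem.List.pyRange 0 (PySem.Str.len s + 1) 1).flatMap
          (fun L => (PySem.List.enumerate str_array 0).filter
            (fun q => q.2 == PySem.Str.slice s none (some L))) := List.flatMap_map ..
  rw [← hflat]
  have hfil : ((PySem.List.enumerate str_array 0).filter (fun q => PySem.Str.startswith s q.2))
      = (PySem.List.enumerate str_array 0).filter (fun q => decide (q.2 ∈ (PySem.List.pyRange 0 (PySem.Str.len s + 1) 1).map (fun L => PySem.Str.slice s none (some L)))) := by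
    apply List.filter_congr
    intro q _
    rw [Bool.eq_iff_iff, decide_eq_true_iff]
    exact (pv_ts_spec s q.2).symm.trans (by simp)
  apply PySem.List.sorted_eq_of_perm_of_pairwise_lt
  · rw [hfil]
    exact (pv_partition_perm _ _ (pv_ts_nodup s)).symm
  · apply List.Pairwise.filter
    have := PySem.List.pairwise_lt_pyRange_one (a := 0) (b := (str_array.length : Int))
    have hmf := PySem.List.map_fst_enumerate str_array 0
    rw [zero_add] at hmf
    rw [← hmf] at this
    exact List.pairwise_map.mp this

-- B's per-prefix block written as the filtered str_array
theorem pv_alt_map (str_array : List String) (sfx p : String) :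
    (pvMatchesAt (pvUnitIndex str_array) sfx).map (fun h => p ++ h.2)
      = (str_array.filter (fun u => PySem.Str.startswith sfx u)).map (fun u => p ++ u) := by
  rw [pv_matchesAt_eq, ← pv_map_snd_filter str_array (fun u => PySem.Str.startswith sfx u),
    List.map_map]
  rfl

-- ===== VERDICT (by name: the statement is the Claim_ definition above) =====
set_option maxHeartbeats 1000000 in
theorem forward_match_spec : Claim_equal_forward_match := by
  intro sentence prefix_list str_array _
  unfold Spec_forward_match forward_match forward_match_alt
  match prefix_list with
  | none =>
      simp only []
      rw [PySem.List.foldl_append_if_eq_filter, List.nil_append, pv_matchesAt_eq,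
        pv_map_snd_filter]
  | some pl =>
      simp only []
      have hg : ∀ (acc : List String) (p : String),
          str_array.foldl (fun ret_list str_unit =>
            let merged_str := p ++ str_unit
            if PySem.Str.startswith sentence merged_str then ret_list ++ [merged_str] else ret_list) acc
          = acc ++ (if PySem.Str.startswith sentence p then
              (pvMatchesAt (pvUnitIndex str_array)
                (PySem.Str.slice sentence (some (PySem.Str.len p)) none)).map (fun h => p ++ h.2)
            else []) := by
        intro acc p
        simp only [PySem.List.foldl_append_if (f := fun u => p ++ u)
          (p := fun u => PySem.Str.startswith sentence (p ++ u)) (l := str_array) (acc := acc)]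
        congr 1
        rcases hp : PySem.Str.startswith sentence p with _ | _
        · have hnil : str_array.filter (fun u => PySem.Str.startswith sentence (p ++ u)) = [] := by
            apply List.filter_eq_nil_iff.mpr
            intro u _
            rw [pv_startswith_append, hp]
            simp
          rw [hnil]
          simp
        · simp only [reduceIte]
          rw [pv_alt_map]
          congr 1
          apply List.filter_congr
          intro u _
          rw [pv_startswith_append, hp, Bool.true_and]
      calc pl.foldl (fun ret_list p =>
              str_array.foldl (fun rl u =>
                let m := p ++ u
                if PySem.Str.startswith sentence m then rl ++ [m] else rl) ret_list) []
          = pl.foldl (fun ret_list p => ret_list ++ (if PySem.Str.startswith sentence p then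
              (pvMatchesAt (pvUnitIndex str_array)
                (PySem.Str.slice sentence (some (PySem.Str.len p)) none)).map (fun h => p ++ h.2)
              else [])) [] := by
            apply PySem.List.foldl_congr_mem
            intro acc p _
            exact hg acc p
        _ = _ := by
            apply PySem.List.foldl_congr_mem
            intro acc p _
            rcases hp : PySem.Str.startswith sentence p with _ | _ <;> simp
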